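-- pv_equiv track=rewrite | github.com/Julesc013/dominium | tools/data/tool_srtm_import.py | _tile_stats
-- ===== SOURCE A (Python) =====
-- from typing import Dict, List, Tuple
--
-- def _tile_stats(grid: List[List[int]]) -> dict:
--     values = [int(value) for row in grid for value in row]
--     total = sum(values)
--     count = len(values)
--     mean = int((total + (count // 2)) // count) if count else 0
--     return {
--         "sample_count": int(count),
--         "min_height_mm": int(min(values) if values else 0),
--         "max_height_mm": int(max(values) if values else 0),
--         "mean_height_mm": int(mean),
--     }
-- ===== SOURCE B (Python) =====
-- def _merge(a, b):
--     ca, ta, mna, mxa = a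
--     cb, tb, mnb, mxb = b
--     return (ca + cb, ta + tb, min(mna, mnb), max(mxa, mxb))
--
--
-- def _tile_stats(grid):
--     # Tournament (pairwise) reduction over singleton summaries (count, total, min, max):
--     # a monoid reduce instead of flatten-then-sum/len/min/max.
--     nodes = [(1, int(v), int(v), int(v)) for row in grid for v in row]
--     if not nodes:
--         return {
--             "sample_count": 0,
--             "min_height_mm": 0,
--             "max_height_mm": 0,
--             "mean_height_mm": 0,
--         }
--     while len(nodes) > 1:
--         nxt = [_merge(nodes[i], nodes[i + 1]) for i in range(0, len(nodes) - 1, 2)]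
--         if len(nodes) % 2:
--             nxt.append(nodes[-1])
--         nodes = nxt
--     c, t, mn, mx = nodes[0]
--     mean = (t + (c // 2)) // c
--     return {
--         "sample_count": c,
--         "min_height_mm": mn,
--         "max_height_mm": mx,
--         "mean_height_mm": mean,
--     }
-- ===== Notes on version B (the rewrite author's own statement) =====
-- stated objective: alternative
-- what changed: Replaces flatten-then-separate sum/len/min/max reductions by a tournament reduction: each value becomes a singleton (count,total,min,max) summary and adjacent summaries are merged pairwise in rounds (a balanced monoid reduce) until one summary remains.
import Mathlib
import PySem

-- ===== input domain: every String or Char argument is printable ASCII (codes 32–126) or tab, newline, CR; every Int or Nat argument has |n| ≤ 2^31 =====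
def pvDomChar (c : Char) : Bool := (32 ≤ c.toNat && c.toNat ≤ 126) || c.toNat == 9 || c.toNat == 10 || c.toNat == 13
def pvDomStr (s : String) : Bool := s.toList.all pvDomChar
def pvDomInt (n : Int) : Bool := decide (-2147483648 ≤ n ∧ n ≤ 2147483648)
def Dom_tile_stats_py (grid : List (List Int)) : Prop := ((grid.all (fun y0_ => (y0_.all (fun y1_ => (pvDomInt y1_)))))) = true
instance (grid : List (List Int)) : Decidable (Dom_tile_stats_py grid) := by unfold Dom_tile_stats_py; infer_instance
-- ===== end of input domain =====

-- B replaces A's flatten + separate sum/len/min/max by a tournament (pairwise-rounds) monoid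
-- reduction over singleton (count,total,min,max) summaries; objective: alternative, same cost.

-- ===== PORT A =====
-- A: flatten the grid into a list, then take sum/len/min/max separately.
def tile_stats_py (grid : List (List Int)) : List (String × Int) :=
  let values : List Int := grid.flatMap (fun row => row.map (fun value => value))
  let total : Int := values.sum
  let count : Int := (values.length : Int)
  let mean : Int := if count ≠ 0 then PySem.Int.floordiv (total + PySem.Int.floordiv count 2) count else 0
  [("sample_count", count),
   ("min_height_mm", if values ≠ [] then (PySem.List.min? values (fun x => x)).getD 0 else 0),
   ("max_height_mm", if values ≠ [] then (PySem.List.max? values (fun x => x)).getD 0 else 0),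
   ("mean_height_mm", mean)]

-- ===== PORT B =====
-- B: tournament reduction. _merge of two (count,total,min,max) summaries:
def pvMerge (a b : Int × Int × Int × Int) : Int × Int × Int × Int :=
  (a.1 + b.1, a.2.1 + b.2.1, min a.2.2.1 b.2.2.1, max a.2.2.2 b.2.2.2)

-- one pairwise round: merge adjacent pairs left to right, an odd last element is kept
-- (this is exactly B's list comprehension over even indices plus the odd-tail append)
def pvRound : List (Int × Int × Int × Int) → List (Int × Int × Int × Int)
  | a :: b :: rest => pvMerge a b :: pvRound rest
  | xs => xs

theorem pvRound_length_le : ∀ xs : List (Int × Int × Int × Int), (pvRound xs).length ≤ xs.length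
  | [] => by simp [pvRound]
  | [_] => by simp [pvRound]
  | _ :: _ :: r => by
      have := pvRound_length_le r
      simp only [pvRound, List.length_cons]
      omega

theorem pvRound_length_lt (a b : Int × Int × Int × Int) (rest : List (Int × Int × Int × Int)) :
    (pvRound (a :: b :: rest)).length < (a :: b :: rest).length := by
  have := pvRound_length_le rest
  simp only [pvRound, List.length_cons]
  omega

-- the `while len(nodes) > 1` loop
def pvReduce (xs : List (Int × Int × Int × Int)) : List (Int × Int × Int × Int) :=
  match h : xs with
  | a :: b :: rest => pvReduce (pvRound (a :: b :: rest))
  | _ => xs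
termination_by xs.length
decreasing_by exact pvRound_length_lt a b rest

def tile_stats_py_alt (grid : List (List Int)) : List (String × Int) :=
  let nodes := grid.flatMap (fun row => row.map (fun v => ((1 : Int), v, v, v)))
  match pvReduce nodes with
  | [] =>
      [("sample_count", 0), ("min_height_mm", 0), ("max_height_mm", 0), ("mean_height_mm", 0)]
  | (c, t, mn, mx) :: _ =>
      let mean : Int := PySem.Int.floordiv (t + PySem.Int.floordiv c 2) c
      [("sample_count", c), ("min_height_mm", mn), ("max_height_mm", mx), ("mean_height_mm", mean)]

-- ===== PRECONDITION & SPEC =====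
def Spec_tile_stats_py (grid : List (List Int)) (out : List (String × Int)) : Prop := out = tile_stats_py_alt grid
instance (grid : List (List Int)) (out : List (String × Int)) : Decidable (Spec_tile_stats_py grid out) := by unfold Spec_tile_stats_py; infer_instance

-- ===== CLAIM (what is proved, stated in full; the proofs are below) =====
def Claim_equal_tile_stats_py : Prop := ∀ (grid : List (List Int)), Dom_tile_stats_py grid → Spec_tile_stats_py grid (tile_stats_py grid)

-- ===== LEMMAS AND PROOFS =====
theorem pvMerge_assoc (a b c : Int × Int × Int × Int) :
    pvMerge (pvMerge a b) c = pvMerge a (pvMerge b c) := by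
  simp [pvMerge, add_assoc, min_assoc, max_assoc]

theorem foldl_pvRound : ∀ (xs : List (Int × Int × Int × Int)) (i : Int × Int × Int × Int),
    (pvRound xs).foldl pvMerge i = xs.foldl pvMerge i
  | [], _ => rfl
  | [_], _ => rfl
  | a :: b :: rest, i => by
      simp only [pvRound, List.foldl_cons]
      rw [foldl_pvRound rest, pvMerge_assoc]

theorem pvReduce_cons : ∀ (n : ℕ) (x : Int × Int × Int × Int) (tl : List (Int × Int × Int × Int)),
    tl.length ≤ n → pvReduce (x :: tl) = [tl.foldl pvMerge x]
  | 0, x, [], _ => by simp [pvReduce]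
  | Nat.succ n, x, [], _ => by simp [pvReduce]
  | Nat.succ n, x, b :: rest, h => by
      rw [pvReduce]
      have hlen : (pvRound rest).length ≤ n := by
        have h1 := pvRound_length_le rest
        simp only [List.length_cons] at h
        omega
      have := pvReduce_cons n (pvMerge x b) (pvRound rest) hlen
      simp only [pvRound] at this ⊢
      rw [this, foldl_pvRound]
      simp [List.foldl_cons]

theorem foldl_leaves : ∀ (tl : List Int) (c t mn mx : Int),
    (tl.map (fun v => ((1 : Int), v, v, v))).foldl pvMerge (c, t, mn, mx)
      = (c + tl.length, t + tl.sum, tl.foldl min mn, tl.foldl max mx)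
  | [], c, t, mn, mx => by simp
  | x :: tl, c, t, mn, mx => by
      simp only [List.map_cons, List.foldl_cons, pvMerge, List.length_cons, List.sum_cons]
      rw [foldl_leaves tl]
      simp only [Prod.mk.injEq]
      and_intros <;> push_cast <;> first | rfl | ring

-- ===== VERDICT (by name: the statement is the Claim_ definition above) =====
theorem tile_stats_py_spec : Claim_equal_tile_stats_py := by
  intro grid _
  show tile_stats_py grid = tile_stats_py_alt grid
  have hnodes : ∀ g : List (List Int), g.flatMap (fun row => row.map (fun v => ((1 : Int), v, v, v)))
      = (g.flatMap (fun row => row.map (fun value => value))).map (fun v => ((1 : Int), v, v, v)) := by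
    intro g
    induction g with
    | nil => rfl
    | cons r rs ih => simp [List.flatMap_cons, ih, List.map_map]
  simp only [tile_stats_py, tile_stats_py_alt, hnodes grid]
  cases h : grid.flatMap (fun row => row.map (fun value => value)) with
  | nil => simp [pvReduce]
  | cons x tl =>
    rw [List.map_cons, pvReduce_cons (tl.map (fun v => ((1 : Int), v, v, v))).length _ _ le_rfl,
      foldl_leaves]
    have hc : (1 : Int) + tl.length = ((x :: tl).length : Int) := by
      simp only [List.length_cons]; push_cast; ring
    simp only [hc]
    simp [PySem.List.min?_id_cons, PySem.List.max?_id_cons]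
    intro h0
    exfalso
    omega
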